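-- pv_equiv track=rewrite | github.com/jskim7018/leetcode_study | algorithm_study/2026/01/20260125/medium/LC_1861.py | rotateTheBox
-- ===== SOURCE A (Python) =====
-- from typing import List
--
-- def rotateTheBox(boxGrid: List[List[str]]) -> List[List[str]]:
--     m, n = len(boxGrid), len(boxGrid[0])
--
--     for i in range(m):
--         stones = 0
--         for j in range(n):
--             if boxGrid[i][j] == '#':
--                 stones += 1
--                 boxGrid[i][j] = '.'
--             if boxGrid[i][j] != '*' and j == n-1:
--                 for k in range(stones):
--                     boxGrid[i][j-k] = '#'
--                 stones = 0
--             elif boxGrid[i][j] == '*':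
--                 for k in range(stones):
--                     boxGrid[i][j-1-k] = '#'
--                 stones = 0
--
--     rotated_grid = [['.' for _ in range(m)] for _ in range(n)]
--     for i in range(m):
--         for j in range(n):
--             rotated_grid[j][i] = boxGrid[m-1-i][j]
--
--     return rotated_grid
-- ===== SOURCE B (Python) =====
-- # B: per-row right-to-left write-pointer sweep (no stone counting, no backfill
-- # inner loops), then rotation built directly by a comprehension.  Like A, B
-- # mutates the rows of boxGrid in place; equivalence is about the return value.
-- from typing import List
--
-- def rotateTheBox(boxGrid: List[List[str]]) -> List[List[str]]:
--     m, n = len(boxGrid), len(boxGrid[0])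
--     for row in boxGrid:
--         empty = n - 1
--         for j in range(n - 1, -1, -1):
--             if row[j] == '*':
--                 empty = j - 1
--             elif row[j] == '#':
--                 row[j] = '.'
--                 row[empty] = '#'
--                 empty -= 1
--     return [[boxGrid[m - 1 - i][j] for i in range(m)] for j in range(n)]
-- ===== Notes on version B (the rewrite author's own statement) =====
-- stated objective: alternative
-- what changed: replaces A's left-to-right per-row gravity (count stones, clear them, backfill inner loops at segment ends) by a single right-to-left write-pointer sweep per row that moves each stone the moment it is seen and never counts, and builds the rotated grid directly by a comprehension instead of preallocating a '.'-grid and index-assigning into it; like A, B settles the rows of boxGrid in place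
import Mathlib
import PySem

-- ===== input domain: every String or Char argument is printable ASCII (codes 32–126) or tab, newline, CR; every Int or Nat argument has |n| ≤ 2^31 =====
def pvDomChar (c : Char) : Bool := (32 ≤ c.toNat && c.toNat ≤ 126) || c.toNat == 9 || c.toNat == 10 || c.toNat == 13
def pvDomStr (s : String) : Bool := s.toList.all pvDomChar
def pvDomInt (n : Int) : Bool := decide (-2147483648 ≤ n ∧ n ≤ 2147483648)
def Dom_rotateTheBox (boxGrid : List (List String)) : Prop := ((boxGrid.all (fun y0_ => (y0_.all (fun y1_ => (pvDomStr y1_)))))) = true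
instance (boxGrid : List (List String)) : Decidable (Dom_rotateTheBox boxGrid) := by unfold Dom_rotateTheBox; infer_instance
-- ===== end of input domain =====

-- B replaces A's left-to-right counting gravity with backfill inner loops by a
-- right-to-left write-pointer sweep per row, and builds the rotation directly by
-- a comprehension; like A, B settles the rows of boxGrid in place (same final
-- grid state); the equivalence proved is about the return value.

-- ===== PORT A =====
-- A's inner j-loop body (state: current row, pending stone count); indexing is
-- via List.getD/List.set, exact for the in-range nonnegative indices A uses on Pre_.
def pvRowStep (n : Nat) (st : List String × Nat) (j : Nat) : List String × Nat :=
  let p := if st.1.getD j "" = "#" then (st.1.set j ".", st.2 + 1) else (st.1, st.2)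
  let r := p.1
  let s := p.2
  if r.getD j "" ≠ "*" ∧ j = n - 1 then
    ((List.range s).foldl (fun r' k => r'.set (j - k) "#") r, 0)
  else if r.getD j "" = "*" then
    ((List.range s).foldl (fun r' k => r'.set (j - 1 - k) "#") r, 0)
  else (r, s)

def rotateTheBox (boxGrid : List (List String)) : List (List String) :=
  let m := boxGrid.length
  let n := (boxGrid.getD 0 []).length
  -- gravity: for i in range(m): inner loop over j mutating row i
  let g := (List.range m).foldl
    (fun g i => g.set i (((List.range n).foldl (pvRowStep n) (g.getD i [], 0)).1)) boxGrid
  -- rotation: n×m grid of '.', then rotated[j][i] = g[m-1-i][j]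
  let init := (List.range n).map (fun _ => (List.range m).map (fun _ => "."))
  (List.range m).foldl (fun rg i =>
    (List.range n).foldl (fun rg' j =>
      rg'.set j ((rg'.getD j []).set i ((g.getD (m - 1 - i) []).getD j ""))) rg) init

-- ===== PORT B =====
-- B's inner j-loop body: state (row, empty write pointer); 'empty' is a Nat
-- with saturating '- 1' — Python's value goes to -1 only where it is never
-- read again as an index, so the returned row is the same.
def pvSweepStep (st : List String × Nat) (j : Nat) : List String × Nat :=
  if st.1.getD j "" = "*" then (st.1, j - 1)
  else if st.1.getD j "" = "#" then ((st.1.set j ".").set st.2 "#", st.2 - 1)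
  else st

def rotateTheBox_alt (boxGrid : List (List String)) : List (List String) :=
  let m := boxGrid.length
  let n := (boxGrid.getD 0 []).length
  -- for row in boxGrid: sweep j = n-1 .. 0 (range(n-1,-1,-1) = reversed range n)
  let g := boxGrid.map (fun row => ((List.range n).reverse.foldl pvSweepStep (row, n - 1)).1)
  -- [[boxGrid[m-1-i][j] for i in range(m)] for j in range(n)]
  (List.range n).map (fun j => (List.range m).map (fun i => (g.getD (m - 1 - i) []).getD j ""))

-- ===== PRECONDITION & SPEC =====
-- Pre_ excludes exactly the inputs on which A raises IndexError: the empty grid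
-- (len(boxGrid[0])) and grids where some row is shorter than row 0.
def Pre_rotateTheBox (boxGrid : List (List String)) : Prop :=
  boxGrid ≠ [] ∧ ∀ r ∈ boxGrid, (boxGrid.getD 0 []).length ≤ r.length

instance (boxGrid : List (List String)) : Decidable (Pre_rotateTheBox boxGrid) := by
  unfold Pre_rotateTheBox; infer_instance

def pvWitness_rotateTheBox : List (List String) :=
  [["#", ".", "*", "#"], [".", "#", ".", "."]]

def Spec_rotateTheBox (boxGrid : List (List String)) (out : List (List String)) : Prop := out = rotateTheBox_alt boxGrid
instance (boxGrid : List (List String)) (out : List (List String)) : Decidable (Spec_rotateTheBox boxGrid out) := by unfold Spec_rotateTheBox; infer_instance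

-- ===== CLAIM (what is proved, stated in full; the proofs are below) =====
def Claim_equal_rotateTheBox : Prop := ∀ (boxGrid : List (List String)), Dom_rotateTheBox boxGrid → Pre_rotateTheBox boxGrid → Spec_rotateTheBox boxGrid (rotateTheBox boxGrid)

-- ===== LEMMAS AND PROOFS =====

-- ---- generic list lemmas ----
theorem pv_getD_append {α : Type} (pre suf : List α) (c d : α) :
    (pre ++ c :: suf).getD pre.length d = c := by
  induction pre with
  | nil => rfl
  | cons a pre ih => simpa using ih

theorem pv_set_append {α : Type} (pre suf : List α) (c v : α) :
    (pre ++ c :: suf).set pre.length v = pre ++ v :: suf := by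
  induction pre with
  | nil => rfl
  | cons a pre ih => simp [List.set, ih]

-- index-aware map, used to characterise A's set-in-a-loop patterns
def pvMapFrom {α : Type} (F : Nat → α → α) : Nat → List α → List α
  | _, [] => []
  | p, a :: l => F p a :: pvMapFrom F (p + 1) l

theorem pvMapFrom_length {α : Type} (F : Nat → α → α) (p : Nat) (l : List α) :
    (pvMapFrom F p l).length = l.length := by
  induction l generalizing p with
  | nil => rfl
  | cons a l ih => simp [pvMapFrom, ih]

theorem pv_foldl_set {α : Type} (F : Nat → α → α) (d : α) (g pre : List α) :
    (List.range' pre.length g.length).foldl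
      (fun h i => h.set i (F i (h.getD i d))) (pre ++ g)
      = pre ++ pvMapFrom F pre.length g := by
  induction g generalizing pre with
  | nil => simp [pvMapFrom]
  | cons c g ih =>
      simp only [List.length_cons, List.range'_succ, List.foldl_cons,
        pv_getD_append, pv_set_append, pvMapFrom]
      have := ih (pre ++ [F pre.length c])
      simpa [List.length_append] using this

theorem pvMapFrom_const {α : Type} (f : α → α) (p : Nat) (l : List α) :
    pvMapFrom (fun _ a => f a) p l = l.map f := by
  induction l generalizing p with
  | nil => rfl
  | cons a l ih => simp [pvMapFrom, ih]

theorem pvMapFrom_comp {α : Type} (F G : Nat → α → α) (p : Nat) (l : List α) :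
    pvMapFrom F p (pvMapFrom G p l) = pvMapFrom (fun i a => F i (G i a)) p l := by
  induction l generalizing p with
  | nil => rfl
  | cons a l ih => simp [pvMapFrom, ih]

theorem pvMapFrom_map_range' {α : Type} (F : Nat → α → α) (g : Nat → α) (p k : Nat) :
    pvMapFrom F p ((List.range' p k).map g) = (List.range' p k).map (fun i => F i (g i)) := by
  induction k generalizing p with
  | zero => rfl
  | succ k ih => simp [List.range'_succ, pvMapFrom, ih]

theorem pvMapFrom_id {α : Type} (p : Nat) (l : List α) : pvMapFrom (fun _ a => a) p l = l := by
  induction l generalizing p with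
  | nil => rfl
  | cons a l ih => simp [pvMapFrom, ih]

-- ---- segment apparatus shared by both characterisations ----
def pvFix (seg : List String) : List String :=
  let s := seg.count "#"
  let body := seg.map (fun c => if c = "#" then "." else c)
  body.take (seg.length - s) ++ List.replicate s "#"

def pvSettleStep (st : List String × List String) (c : String) : List String × List String :=
  if c = "*" then (st.1 ++ pvFix st.2 ++ ["*"], []) else (st.1, st.2 ++ [c])

def pvSettle (row : List String) : List String :=
  let st := row.foldl pvSettleStep ([], [])
  st.1 ++ pvFix st.2

-- ---- A side: counting gravity = pvSettle ----
theorem pv_setfill (s : Nat) : ∀ (cl X tail : List String) (j : Nat),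
    j + 1 = cl.length + X.length → s ≤ X.length →
    (List.range s).foldl (fun r k => r.set (j - k) "#") (cl ++ X ++ tail)
      = cl ++ (X.take (X.length - s) ++ List.replicate s "#") ++ tail := by
  induction s with
  | zero => intro cl X tail j hj hs; simp
  | succ s ih =>
      intro cl X tail j hj hs
      rw [List.range_succ, List.foldl_append,
        ih cl X tail j hj (by omega)]
      simp only [List.foldl_cons, List.foldl_nil]
      have hm : X.length - s = (X.length - (s + 1)) + 1 := by omega
      have htk : X.take (X.length - s)
          = X.take (X.length - (s + 1)) ++ [X[X.length - (s + 1)]'(by omega)] := by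
        rw [hm, List.take_succ, List.getElem?_eq_getElem (by omega)]
        simp
      have hidx : j - s = (cl ++ X.take (X.length - (s + 1))).length := by
        simp [List.length_take]; omega
      rw [htk, hidx]
      have : cl ++ (X.take (X.length - (s + 1)) ++ [X[X.length - (s + 1)]'(by omega)]
            ++ List.replicate s "#") ++ tail
          = (cl ++ X.take (X.length - (s + 1)))
            ++ X[X.length - (s + 1)]'(by omega) :: (List.replicate s "#" ++ tail) := by
        simp only [List.append_assoc, List.cons_append, List.singleton_append, List.nil_append]
      rw [this, pv_set_append]
      simp [List.replicate_succ]

theorem pvFix_length (seg : List String) : (pvFix seg).length = seg.length := by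
  have : seg.count "#" ≤ seg.length := List.count_le_length
  simp [pvFix, List.length_take]
  omega

theorem pv_step_star (n : Nat) (cl seg suf : List String) :
    pvRowStep n ((cl ++ seg.map (fun c => if c = "#" then "." else c)) ++ "*" :: suf, seg.count "#")
      (cl ++ seg.map (fun c => if c = "#" then "." else c)).length
    = ((cl ++ pvFix seg ++ ["*"]) ++ suf, 0) := by
  simp only [pvRowStep, pv_getD_append, pv_set_append, String.reduceEq, reduceIte, ne_eq,
    not_true_eq_false, false_and, if_false]
  rcases List.eq_nil_or_concat seg with hseg | ⟨_, _, hseg⟩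
  · subst hseg; simp [pvFix]
  · have hlen : 1 ≤ seg.length := by rw [hseg]; simp
    have hL : (cl ++ seg.map (fun c => if c = "#" then "." else c)).length - 1
        = cl.length + seg.length - 1 := by simp
    have hsf := pv_setfill (seg.count "#") cl
      (seg.map (fun c => if c = "#" then "." else c)) ("*" :: suf)
      (cl.length + seg.length - 1)
      (by simp; omega) (by simp; exact List.count_le_length)
    rw [hL, List.append_assoc] at *
    rw [hsf]
    simp [pvFix]

theorem pv_step_mid (n : Nat) (cl seg suf : List String) (c : String) (hc : ¬ c = "*")
    (hj : ¬ ((cl ++ seg.map (fun c => if c = "#" then "." else c)).length = n - 1)) :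
    pvRowStep n ((cl ++ seg.map (fun c => if c = "#" then "." else c)) ++ c :: suf, seg.count "#")
      (cl ++ seg.map (fun c => if c = "#" then "." else c)).length
    = ((cl ++ (seg ++ [c]).map (fun c => if c = "#" then "." else c)) ++ suf,
        (seg ++ [c]).count "#") := by
  by_cases hh : c = "#"
  · subst hh
    simp only [pvRowStep, pv_getD_append, pv_set_append, String.reduceEq, reduceIte, ne_eq,
      not_false_eq_true, true_and, if_neg hj, if_false]
    simp [List.count_append, List.append_assoc]
  · simp only [pvRowStep, pv_getD_append, pv_set_append, if_neg hh, ne_eq,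
      if_neg hc, if_neg (fun h => hj (And.right h))]
    simp [List.count_append, List.count_cons, hh, hc, List.append_assoc]

theorem pv_step_last (n : Nat) (cl seg suf : List String) (c : String) (hc : ¬ c = "*")
    (hj : (cl ++ seg.map (fun c => if c = "#" then "." else c)).length = n - 1) :
    pvRowStep n ((cl ++ seg.map (fun c => if c = "#" then "." else c)) ++ c :: suf, seg.count "#")
      (cl ++ seg.map (fun c => if c = "#" then "." else c)).length
    = ((cl ++ pvFix (seg ++ [c])) ++ suf, 0) := by
  have hcnt : seg.count "#" ≤ seg.length := List.count_le_length
  have hstate : ∀ x : String,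
      (cl ++ seg.map (fun c => if c = "#" then "." else c)) ++ x :: suf
      = cl ++ (seg.map (fun c => if c = "#" then "." else c) ++ [x]) ++ suf := by
    intro x; simp
  by_cases hh : c = "#"
  · subst hh
    simp only [pvRowStep, pv_getD_append, pv_set_append, String.reduceEq, reduceIte, ne_eq,
      not_false_eq_true, true_and, if_pos hj, if_true]
    rw [hstate "."]
    have hsf := pv_setfill (seg.count "#" + 1) cl
      (seg.map (fun c => if c = "#" then "." else c) ++ ["."]) suf
      ((cl ++ seg.map (fun c => if c = "#" then "." else c)).length)
      (by simp; omega) (by simp; omega)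
    rw [hsf]
    simp [pvFix, List.count_append]
  · simp only [pvRowStep, pv_getD_append, pv_set_append, if_neg hh, ne_eq,
      if_pos (And.intro hc hj)]
    rw [hstate c]
    have hsf := pv_setfill (seg.count "#") cl
      (seg.map (fun c => if c = "#" then "." else c) ++ [c]) suf
      ((cl ++ seg.map (fun c => if c = "#" then "." else c)).length)
      (by simp; omega) (by simp; omega)
    rw [hsf]
    simp [pvFix, List.count_append, List.count_cons, hh, hc]

theorem pv_core (n : Nat) : ∀ (rest : List String), rest ≠ [] → ∀ (cl seg tail : List String),
    n = cl.length + seg.length + rest.length →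
    ((List.range' (cl.length + seg.length) rest.length).foldl (pvRowStep n)
        (cl ++ seg.map (fun c => if c = "#" then "." else c) ++ (rest ++ tail), seg.count "#")).1
      = ((rest.foldl pvSettleStep (cl, seg)).1 ++ pvFix (rest.foldl pvSettleStep (cl, seg)).2) ++ tail := by
  intro rest
  induction rest with
  | nil => intro h; exact absurd rfl h
  | cons c rest' ih =>
      intro _ cl seg tail hn
      have hL : cl.length + seg.length
          = (cl ++ seg.map (fun c => if c = "#" then "." else c)).length := by simp
      simp only [List.length_cons, List.range'_succ, List.foldl_cons, List.cons_append]
      rw [hL]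
      by_cases hr : rest' = []
      · -- last column: j = n - 1
        subst hr
        have hj : (cl ++ seg.map (fun c => if c = "#" then "." else c)).length = n - 1 := by
          simp at hn ⊢; omega
        by_cases hc : c = "*"
        · subst hc
          rw [pv_step_star]
          simp [pvSettleStep, pvFix]
        · rw [pv_step_last n cl seg ([] ++ tail) c hc hj]
          simp [pvSettleStep, hc]
      · -- middle column
        have hlen' : 1 ≤ rest'.length := List.length_pos_of_ne_nil hr
        by_cases hc : c = "*"
        · subst hc
          rw [pv_step_star]
          have ihx := ih hr (cl ++ pvFix seg ++ ["*"]) [] tail (by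
            simp at hn ⊢; simp [pvFix_length]; omega)
          simp only [List.map_nil, List.count_nil, List.append_nil, List.nil_append,
            List.length_append, List.length_cons, List.length_nil, pvFix_length] at ihx
          have harith : (cl ++ seg.map (fun c => if c = "#" then "." else c)).length + 1
              = cl.length + (seg.length + 1) := by
            simp only [List.length_append, List.length_map]; omega
          have e : cl.length + seg.length + (0 + 1) + 0 = cl.length + (seg.length + 1) := by omega
          rw [e] at ihx
          rw [harith, ihx]
          simp [pvSettleStep]
        · have hj : ¬ ((cl ++ seg.map (fun c => if c = "#" then "." else c)).length = n - 1) := by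
            simp at hn ⊢; omega
          rw [pv_step_mid n cl seg (rest' ++ tail) c hc hj]
          have ihx := ih hr cl (seg ++ [c]) tail (by simp at hn ⊢; omega)
          simp only [List.length_append, List.length_cons, List.length_nil] at ihx
          have harith : (cl ++ seg.map (fun c => if c = "#" then "." else c)).length + 1
              = cl.length + (seg.length + 1) := by
            simp only [List.length_append, List.length_map]; omega
          have e : cl.length + (seg.length + (0 + 1)) = cl.length + (seg.length + 1) := by omega
          rw [e] at ihx
          rw [harith, ihx]
          simp [pvSettleStep, hc]

theorem pv_row (n : Nat) (row : List String) (h : n ≤ row.length) :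
    ((List.range n).foldl (pvRowStep n) (row, 0)).1 = pvSettle (row.take n) ++ row.drop n := by
  rcases Nat.eq_zero_or_pos n with h0 | h0
  · subst h0; simp [pvSettle, pvFix]
  · have hlen : (row.take n).length = n := by simp [List.length_take]; omega
    have hne : row.take n ≠ [] := by
      intro he; rw [he] at hlen; simp at hlen; omega
    have hc := pv_core n (row.take n) hne [] [] (row.drop n) (by simp; omega)
    simp only [List.length_nil, List.map_nil, List.count_nil, List.nil_append,
      Nat.zero_add, Nat.add_zero] at hc
    have hrange : List.range n = List.range' 0 (row.take n).length := by
      rw [List.range_eq_range', hlen]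
    have hrow : row = row.take n ++ row.drop n := (List.take_append_drop n row).symm
    conv_lhs => rw [hrow]
    rw [hrange, hc]
    simp [pvSettle]

-- ---- B side: right-to-left sweep = pvSettle ----
-- pvSB r D s: the settled form of (r.reverse) given that, in the current
-- segment, the already-processed suffix left D non-stone cells and s stones.
def pvSB : List String → List String → Nat → List String
  | [], D, s => D ++ List.replicate s "#"
  | c :: r, D, s =>
    if c = "*" then pvSB r [] 0 ++ "*" :: (D ++ List.replicate s "#")
    else if c = "#" then pvSB r (("." :: D).dropLast) (s + 1)
    else pvSB r (c :: D) s

-- final value of the write pointer (only .1 of the fold is ever used; tracked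
-- so the loop invariant is a plain state equality)
def pvD : List String → Nat → Nat
  | [], d => d
  | c :: r, d => if c = "*" then pvD r 0 else if c = "#" then pvD r d else pvD r (d + 1)

theorem pv_getD_append2 {α : Type} (pre r suf : List α) (c d : α) (j : Nat)
    (hj : j = pre.length + r.length) : (pre ++ r ++ c :: suf).getD j d = c := by
  subst hj
  have := pv_getD_append (pre ++ r) suf c d
  simpa using this

theorem pv_set_append2 {α : Type} (pre r suf : List α) (c v : α) (j : Nat)
    (hj : j = pre.length + r.length) : (pre ++ r ++ c :: suf).set j v = pre ++ r ++ v :: suf := by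
  subst hj
  have := pv_set_append (pre ++ r) suf c v
  simpa using this

theorem pv_set_last {α : Type} (A B : List α) (l : List α) (v : α) (hl : l ≠ []) :
    (A ++ l ++ B).set (A.length + l.length - 1) v = A ++ l.dropLast ++ v :: B := by
  obtain ⟨l', a, rfl⟩ := (List.eq_nil_or_concat l).resolve_left hl
  simp only [List.concat_eq_append]
  have h1 : A ++ (l' ++ [a]) ++ B = (A ++ l') ++ a :: B := by simp
  have h2 : A.length + (l' ++ [a]).length - 1 = (A ++ l').length := by simp
  rw [h1, h2, pv_set_append]
  simp

theorem pv_master : ∀ (r pre D tail : List String) (s : Nat),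
    (List.range' pre.length r.length).reverse.foldl pvSweepStep
      (pre ++ r.reverse ++ D ++ List.replicate s "#" ++ tail,
        pre.length + r.length + D.length - 1)
    = (pre ++ pvSB r D s ++ tail, pre.length + pvD r D.length - 1) := by
  intro r
  induction r with
  | nil => intro pre D tail s; simp [pvSB, pvD]
  | cons c r' ih =>
      intro pre D tail s
      have hrange : (List.range' pre.length (c :: r').length).reverse
          = (pre.length + r'.length) :: (List.range' pre.length r'.length).reverse := by
        simp [List.range'_concat]
      have hrow : pre ++ (c :: r').reverse ++ D ++ List.replicate s "#" ++ tail
          = pre ++ r'.reverse ++ c :: (D ++ List.replicate s "#" ++ tail) := by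
        simp
      rw [hrange, List.foldl_cons, hrow]
      by_cases hc : c = "*"
      · subst hc
        have hstep : pvSweepStep
            (pre ++ r'.reverse ++ "*" :: (D ++ List.replicate s "#" ++ tail),
              pre.length + (("*" : String) :: r').length + D.length - 1)
              (pre.length + r'.length)
            = (pre ++ r'.reverse ++ ([] : List String) ++ List.replicate 0 "#"
                ++ ("*" :: (D ++ List.replicate s "#" ++ tail)),
              pre.length + r'.length + ([] : List String).length - 1) := by
          have hgd : (pre ++ r'.reverse ++ ("*" : String) ::
              (D ++ List.replicate s "#" ++ tail)).getD (pre.length + r'.length) "" = "*" :=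
            pv_getD_append2 _ _ _ _ _ _ (by simp)
          simp [pvSweepStep, hgd]
        rw [hstep, ih]
        simp [pvSB, pvD]
      · by_cases hh : c = "#"
        · subst hh
          have hstep : pvSweepStep
              (pre ++ r'.reverse ++ ("#" : String) :: (D ++ List.replicate s "#" ++ tail),
                pre.length + (("#" : String) :: r').length + D.length - 1)
                (pre.length + r'.length)
              = (pre ++ r'.reverse ++ (("." :: D).dropLast)
                  ++ List.replicate (s + 1) "#" ++ tail,
                pre.length + r'.length + (("." :: D).dropLast).length - 1) := by
            have hgd : (pre ++ r'.reverse ++ ("#" : String) ::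
                (D ++ List.replicate s "#" ++ tail)).getD (pre.length + r'.length) "" = "#" :=
              pv_getD_append2 _ _ _ _ _ _ (by simp)
            simp only [pvSweepStep, hgd, String.reduceEq, if_false, reduceIte]
            rw [pv_set_append2 _ _ _ _ _ _ (by simp : pre.length + r'.length
              = pre.length + r'.reverse.length)]
            have h3 : pre ++ r'.reverse ++ ("." : String) ::
                (D ++ List.replicate s "#" ++ tail)
                = (pre ++ r'.reverse) ++ (("." : String) :: D)
                    ++ (List.replicate s "#" ++ tail) := by simp
            have h4 : pre.length + (("#" : String) :: r').length + D.length - 1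
                = (pre ++ r'.reverse).length + (("." : String) :: D).length - 1 := by
              simp <;> omega
            rw [h3, h4, pv_set_last _ _ _ _ (by simp : ("." : String) :: D ≠ [])]
            refine Prod.ext ?_ ?_
            · simp [List.replicate_succ]
            · simp <;> omega
          rw [hstep, ih]
          simp [pvSB, pvD]
        · have hstep : pvSweepStep
              (pre ++ r'.reverse ++ c :: (D ++ List.replicate s "#" ++ tail),
                pre.length + (c :: r').length + D.length - 1)
                (pre.length + r'.length)
              = (pre ++ r'.reverse ++ (c :: D) ++ List.replicate s "#" ++ tail,
                pre.length + r'.length + (c :: D).length - 1) := by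
            have hgd : (pre ++ r'.reverse ++ c ::
                (D ++ List.replicate s "#" ++ tail)).getD (pre.length + r'.length) "" = c :=
              pv_getD_append2 _ _ _ _ _ _ (by simp)
            simp only [pvSweepStep, hgd, if_neg hc, if_neg hh]
            refine Prod.ext ?_ ?_
            · simp
            · simp
              omega
          rw [hstep, ih]
          simp [pvSB, pvD, hc, hh]

-- pvFix with a partially processed segment tail (D, s) on top
def pvFixW (seg D : List String) (s : Nat) : List String :=
  ((seg.map (fun c => if c = "#" then "." else c)) ++ D).take
      (seg.length + D.length - seg.count "#")
    ++ List.replicate (s + seg.count "#") "#"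

theorem pvFixW_nil (seg : List String) : pvFixW seg [] 0 = pvFix seg := by
  simp [pvFixW, pvFix]

theorem pvFixW_empty (D : List String) (s : Nat) :
    pvFixW [] D s = D ++ List.replicate s "#" := by
  simp [pvFixW]

theorem pv_take_dropLast {α : Type} (M l : List α) (k : Nat) (h : k ≤ M.length + l.length - 1)
    (hl : l ≠ []) : (M ++ l).take k = (M ++ l.dropLast).take k := by
  obtain ⟨l', a, rfl⟩ := (List.eq_nil_or_concat l).resolve_left hl
  simp only [List.concat_eq_append]
  have h1 : M ++ (l' ++ [a]) = (M ++ l') ++ [a] := by simp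
  have h2 : k ≤ (M ++ l').length := by simp at h ⊢; omega
  rw [h1, List.take_append_of_le_length h2]
  simp

theorem pvFixW_hash (seg D : List String) (s : Nat) :
    pvFixW (seg ++ ["#"]) D s = pvFixW seg (("." :: D).dropLast) (s + 1) := by
  have hcc : seg.count ("#" : String) ≤ seg.length := List.count_le_length
  unfold pvFixW
  have h1 : (seg ++ ["#"]).count ("#" : String) = seg.count "#" + 1 := by simp
  have h2 : (seg ++ ["#"]).map (fun c => if c = "#" then "." else c) ++ D
      = seg.map (fun c => if c = "#" then "." else c) ++ (("." : String) :: D) := by simp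
  rw [h1, h2]
  have h3 : (seg ++ ["#"]).length + D.length - (seg.count "#" + 1)
      = seg.length + D.length - seg.count "#" := by simp <;> omega
  have h4 : seg.length + (("." : String) :: D).dropLast.length - seg.count "#"
      = seg.length + D.length - seg.count "#" := by simp
  rw [h3, h4, pv_take_dropLast _ (("." : String) :: D) _ (by simp <;> omega) (by simp)]
  have h5 : s + (seg.count "#" + 1) = s + 1 + seg.count "#" := by omega
  rw [h5]

theorem pvFixW_other (seg D : List String) (s : Nat) (c : String) (hh : c ≠ "#") :
    pvFixW (seg ++ [c]) D s = pvFixW seg (c :: D) s := by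
  unfold pvFixW
  have h1 : (seg ++ [c]).count ("#" : String) = seg.count "#" := by simp [hh]
  have h2 : (seg ++ [c]).map (fun x => if x = "#" then "." else x) ++ D
      = seg.map (fun x => if x = "#" then "." else x) ++ (c :: D) := by simp [hh]
  rw [h1, h2]
  have h3 : (seg ++ [c]).length + D.length - seg.count "#"
      = seg.length + (c :: D).length - seg.count "#" := by simp <;> omega
  rw [h3]

theorem pvSB_settle : ∀ (u : List String), ∀ (D : List String) (s : Nat),
    pvSB u.reverse D s
      = (u.foldl pvSettleStep ([], [])).1 ++ pvFixW (u.foldl pvSettleStep ([], [])).2 D s := by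
  intro u
  induction u using List.reverseRecOn with
  | nil => intro D s; simp [pvSB, pvFixW]
  | append_singleton v c ih =>
      intro D s
      have hrev : (v ++ [c]).reverse = c :: v.reverse := by simp
      rw [hrev, List.foldl_append, List.foldl_cons, List.foldl_nil]
      by_cases hc : c = "*"
      · subst hc
        simp only [pvSB, reduceIte, ih, pvSettleStep, pvFixW_nil, pvFixW_empty]
        simp
      · by_cases hh : c = "#"
        · subst hh
          simp only [pvSB, String.reduceEq, reduceIte, ih, pvSettleStep]
          rw [pvFixW_hash]
        · simp only [pvSB, if_neg hc, if_neg hh, ih, pvSettleStep]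
          rw [pvFixW_other _ _ _ _ hh]

theorem pv_sweep_row (n : Nat) (row : List String) (h : n ≤ row.length) :
    ((List.range n).reverse.foldl pvSweepStep (row, n - 1)).1
      = pvSettle (row.take n) ++ row.drop n := by
  have hlen : (row.take n).length = n := by simp; omega
  have hm := pv_master (row.take n).reverse [] [] (row.drop n) 0
  simp only [List.reverse_reverse, List.length_reverse, hlen, List.length_nil,
    List.replicate_zero, List.nil_append, List.append_nil, List.take_append_drop,
    Nat.zero_add, Nat.add_zero] at hm
  rw [List.range_eq_range', hm]
  rw [pvSB_settle (row.take n) [] 0, pvFixW_nil]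
  simp [pvSettle]

-- ---- rotation characterisation (A's double set-loop) ----
theorem pv_rot_inner (W : Nat → Nat → String) (i n : Nat) (rg : List (List String))
    (hn : rg.length = n) :
    (List.range n).foldl (fun rg' j => rg'.set j ((rg'.getD j []).set i (W i j))) rg
      = pvMapFrom (fun j row => row.set i (W i j)) 0 rg := by
  have := pv_foldl_set (fun j row => row.set i (W i j)) [] rg []
  simp only [List.nil_append, List.length_nil] at this
  rw [List.range_eq_range', ← hn, this]

theorem pv_rot_fold (W : Nat → Nat → String) (n : Nat) : ∀ (l : List Nat)
    (rg : List (List String)), rg.length = n →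
    l.foldl (fun rg i =>
        (List.range n).foldl (fun rg' j => rg'.set j ((rg'.getD j []).set i (W i j))) rg) rg
      = l.foldl (fun rg i => pvMapFrom (fun j row => row.set i (W i j)) 0 rg) rg := by
  intro l
  induction l with
  | nil => intro rg _; rfl
  | cons c l ih =>
      intro rg hn
      simp only [List.foldl_cons]
      rw [pv_rot_inner W c n rg hn, ih _ (by rw [pvMapFrom_length]; exact hn)]

theorem pv_fold_mapFrom (H : Nat → Nat → List String → List String) : ∀ (l : List Nat)
    (rg : List (List String)) (p : Nat),
    l.foldl (fun rg i => pvMapFrom (fun j row => H i j row) p rg) rg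
      = pvMapFrom (fun j row => l.foldl (fun r i => H i j r) row) p rg := by
  intro l
  induction l with
  | nil => intro rg p; simp [pvMapFrom_id]
  | cons c l ih =>
      intro rg p
      simp only [List.foldl_cons]
      rw [ih, pvMapFrom_comp]

theorem pv_row_sets (W : Nat → Nat → String) (j m : Nat) (row0 : List String)
    (hm : row0.length = m) :
    (List.range m).foldl (fun r i => r.set i (W i j)) row0
      = pvMapFrom (fun i _ => W i j) 0 row0 := by
  have := pv_foldl_set (fun i _ => W i j) "" row0 []
  simp only [List.nil_append, List.length_nil] at this
  rw [List.range_eq_range', ← hm, this]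

-- A's rotation characterised: entry (j, i) is W i j
theorem pv_rot (W : Nat → Nat → String) (m n : Nat) :
    (List.range m).foldl (fun rg i =>
        (List.range n).foldl (fun rg' j => rg'.set j ((rg'.getD j []).set i (W i j))) rg)
      ((List.range n).map (fun _ => (List.range m).map (fun _ => ".")))
      = (List.range n).map (fun j => (List.range m).map (fun i => W i j)) := by
  rw [pv_rot_fold W n (List.range m) _ (by simp), pv_fold_mapFrom]
  have h1 : (List.range n) = List.range' 0 n := List.range_eq_range'
  have h2 : (List.range m) = List.range' 0 m := List.range_eq_range'
  rw [h1, pvMapFrom_map_range']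
  apply List.map_congr_left
  intro j _
  rw [pv_row_sets W j m _ (by simp), h2, pvMapFrom_map_range']

-- ===== VERDICT (by name: the statement is the Claim_ definition above) =====
theorem rotateTheBox_spec : Claim_equal_rotateTheBox := by
  intro boxGrid _ hpre
  obtain ⟨hne, hrows⟩ := hpre
  have hm : 0 < boxGrid.length := List.length_pos_of_ne_nil hne
  show rotateTheBox boxGrid = rotateTheBox_alt boxGrid
  simp only [rotateTheBox, rotateTheBox_alt]
  set n := (boxGrid.getD 0 []).length with hn
  set m := boxGrid.length with hmdef
  have hgrav := pv_foldl_set (fun _ a => ((List.range n).foldl (pvRowStep n) (a, 0)).1)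
    [] boxGrid []
  simp only [List.nil_append, List.length_nil, pvMapFrom_const] at hgrav
  rw [← List.range_eq_range'] at hgrav
  rw [hgrav]
  rw [pv_rot (fun i j =>
    (((boxGrid.map (fun row => ((List.range n).foldl (pvRowStep n) (row, 0)).1)).getD
      (m - 1 - i) []).getD j "")) m n]
  have hG : boxGrid.map (fun row => ((List.range n).foldl (pvRowStep n) (row, 0)).1)
      = boxGrid.map (fun row => ((List.range n).reverse.foldl pvSweepStep (row, n - 1)).1) := by
    apply List.map_congr_left
    intro row hrow
    rw [pv_row n row (hrows row hrow), pv_sweep_row n row (hrows row hrow)]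
  rw [hG]
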